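-- pv_equiv track=rewrite | github.com/kaltepeter/aoc | py_src/y2023/day_14/day.py | spin_cycle
-- ===== SOURCE A (Python) =====
-- InputData2 = tuple[str]
--
-- FLAT_ROCK = "#"
--
-- def spin_cycle(data: InputData2) -> InputData2:
--     rotated_data = data
--     for _ in range(4):
--         rotated_grid = tuple(map("".join, zip(*rotated_data)))
--         tilted = tuple(
--             FLAT_ROCK.join(
--                 [
--                     "".join(sorted(tuple(group), reverse=True))
--                     for group in row.split(FLAT_ROCK)
--                 ]
--             )
--             for row in rotated_grid
--         )
--         rotated_data = tuple(row[::-1] for row in tilted)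
--     return rotated_data
-- ===== SOURCE B (Python) =====
-- FLAT_ROCK = "#"
--
--
-- def _flush(counts, out):
--     # emit the buffered characters in ascending code order, then clear the buffer
--     for code in range(128):
--         if counts[code]:
--             out.append(chr(code) * counts[code])
--             counts[code] = 0
--
--
-- def spin_cycle(data):
--     grid = data
--     for _ in range(4):
--         width = min((len(row) for row in grid), default=0)
--         new_rows = []
--         for j in range(width):
--             counts = [0] * 128
--             out = []
--             for i in range(len(grid) - 1, -1, -1):
--                 c = grid[i][j]
--                 if c == FLAT_ROCK:
--                     _flush(counts, out)
--                     out.append(FLAT_ROCK)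
--                 else:
--                     counts[ord(c)] += 1
--             _flush(counts, out)
--             new_rows.append("".join(out))
--         grid = tuple(new_rows)
--     return grid
-- ===== Notes on version B (the rewrite author's own statement) =====
-- stated objective: alternative
-- what changed: B drops A's four transpose/split/comparison-sort/string-reverse passes per rotation and instead processes each column of the current grid in a single right-to-left pass with a 128-entry counting buffer, emitting each '#'-delimited group in ascending code order, which directly produces A's reversed descending-sorted row.
import Mathlib
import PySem

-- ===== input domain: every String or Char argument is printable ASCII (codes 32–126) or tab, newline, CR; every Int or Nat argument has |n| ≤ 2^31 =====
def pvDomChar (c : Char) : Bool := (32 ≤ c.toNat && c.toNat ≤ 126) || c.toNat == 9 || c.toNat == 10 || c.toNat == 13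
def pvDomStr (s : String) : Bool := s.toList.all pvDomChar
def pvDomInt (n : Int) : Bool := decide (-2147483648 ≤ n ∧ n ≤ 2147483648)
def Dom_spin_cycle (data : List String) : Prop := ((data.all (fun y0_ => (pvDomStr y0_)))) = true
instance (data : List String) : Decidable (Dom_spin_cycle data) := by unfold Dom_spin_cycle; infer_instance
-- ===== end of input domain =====

-- B replaces A's rotate/split/comparison-sort/reverse pipeline by a single right-to-left
-- counting-sort pass per column (objective: alternative decomposition, same result).

-- ===== PORT A =====
-- Strings are handled as List Char (String ↔ List Char bridge); exact on the stated domain.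

-- zip(*rows) for a tuple of strings: truncating transpose, ported by hand (exact:
-- Python's zip stops at the first exhausted row; the fuel is the first row's length,
-- which bounds the number of iterations because the first row shrinks each step).
def pvZipGo : Nat → List (List Char) → List (List Char)
  | 0, _ => []
  | fuel + 1, rows =>
      if rows.any (·.isEmpty) then []
      else (rows.map (·.headD ' ')) :: pvZipGo fuel (rows.map (·.tail))

def pvZipStar (rows : List (List Char)) : List (List Char) :=
  match rows with
  | [] => []
  | r :: _ => pvZipGo r.length rows

-- '#'.join("".join(sorted(tuple(group), reverse=True)) for group in row.split('#'))
def pvTilt (row : List Char) : List Char :=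
  PySem.Chars.join ['#']
    ((PySem.Chars.splitOn row ['#']).map (fun g => PySem.List.sorted g (fun c => c) true))

-- one iteration of A's loop body (transpose, tilt each row, reverse each row)
def pvStepA (g : List (List Char)) : List (List Char) :=
  ((pvZipStar g).map pvTilt).map (fun row => (PySem.List.slice? row none none (-1)).getD [])

def spin_cycle (data : List String) : List String :=
  ((PySem.List.pyRange 0 4 1).foldl (fun g _ => pvStepA g) (data.map String.toList)).map
    (fun r => String.ofList r)

-- ===== PORT B =====
def pvZeros : List Nat := List.replicate 128 0

-- _flush: emit the buffered characters in ascending code order (counts are then zero again,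
-- which the port models by restarting from pvZeros at the call sites)
def pvFlush (counts : List Nat) : List Char :=
  (List.range 128).flatMap (fun code => List.replicate (counts.getD code 0) (Char.ofNat code))

-- the i-descending inner loop over one column, state = (counts, out)
def pvScan : List Char → List Nat → List Char → List Char
  | [], counts, out => out ++ pvFlush counts
  | c :: rest, counts, out =>
      if c = '#' then pvScan rest pvZeros (out ++ pvFlush counts ++ ['#'])
      else pvScan rest (counts.modify c.toNat (· + 1)) out

-- min((len(row) for row in grid), default=0)
def pvMinWidth (g : List (List Char)) : Nat :=
  match g with
  | [] => 0
  | r :: rest => rest.foldl (fun m row => min m row.length) r.length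

-- one iteration of B's loop body (grid[i][j] is always in range since j < min width,
-- so the getD default is never used)
def pvStepB (g : List (List Char)) : List (List Char) :=
  (List.range (pvMinWidth g)).map (fun j =>
    pvScan ((g.map (fun row => row.getD j ' ')).reverse) pvZeros [])

def spin_cycle_alt (data : List String) : List String :=
  ((PySem.List.pyRange 0 4 1).foldl (fun g _ => pvStepB g) (data.map String.toList)).map
    (fun r => String.ofList r)

-- ===== PRECONDITION & SPEC =====
def Spec_spin_cycle (data : List String) (out : List String) : Prop := out = spin_cycle_alt data
instance (data : List String) (out : List String) : Decidable (Spec_spin_cycle data out) := by unfold Spec_spin_cycle; infer_instance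

-- ===== CLAIM (what is proved, stated in full; the proofs are below) =====
def Claim_equal_spin_cycle : Prop := ∀ (data : List String), Dom_spin_cycle data → Spec_spin_cycle data (spin_cycle data)

-- ===== LEMMAS AND PROOFS =====

theorem toNat_ofNat_small (k : Nat) (h : k < 128) : (Char.ofNat k).toNat = k := by
  rw [Char.toNat_ofNat]; simp [Nat.isValidChar]; omega

theorem ofNat_eq_iff (a : Char) (k : Nat) (hk : k < 128) :
    Char.ofNat k = a ↔ k = a.toNat := by
  constructor
  · intro h; rw [← h, toNat_ofNat_small k hk]
  · intro h; rw [h, Char.ofNat_toNat]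

-- reference splitter: Python's row.split('#') as plain structural recursion
def pvSplit : List Char → List (List Char)
  | [] => [[]]
  | c :: rest => if c = '#' then [] :: pvSplit rest else (pvSplit rest).modifyHead (c :: ·)

theorem pvSplit_ne_nil (xs : List Char) : pvSplit xs ≠ [] := by
  induction xs with
  | nil => simp [pvSplit]
  | cons c rest ih =>
    simp only [pvSplit]
    split
    · simp
    · cases h : pvSplit rest with
      | nil => exact absurd h ih
      | cons a t => simp

theorem splitOn_go_eq (l : List Char) : ∀ (fuel : Nat) (cur : List Char) (acc : List (List Char)),
    l.length ≤ fuel →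
    PySem.Chars.splitOn.go ['#'] fuel l cur acc
      = acc.reverse ++ (pvSplit l).modifyHead (cur.reverse ++ ·) := by
  induction l with
  | nil =>
    intro fuel cur acc _
    cases fuel <;> simp [PySem.Chars.splitOn.go, pvSplit]
  | cons c rest ih =>
    intro fuel cur acc hlen
    cases fuel with
    | zero => simp at hlen
    | succ f =>
      rw [PySem.Chars.splitOn.go]
      by_cases hc : c = '#'
      · subst hc
        simp only [List.isPrefixOf, BEq.rfl, Bool.true_and, List.isPrefixOf_nil_left, if_pos]
        have hih := ih f [] (cur.reverse :: acc) (Nat.le_of_succ_le_succ (by simpa using hlen))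
        simp only [List.reverse_nil] at hih
        rw [show (List.drop ['#'].length ('#' :: rest)) = rest from rfl, hih]
        simp [pvSplit]
        exact congrFun List.modifyHead_id (pvSplit rest)
      · have hpre : (['#'].isPrefixOf (c :: rest)) = false := by
          simp [List.isPrefixOf]; exact fun h => hc h.symm
        rw [if_neg (by simp [hpre])]
        rw [ih f (c :: cur) acc (Nat.le_of_succ_le_succ hlen)]
        simp only [pvSplit, if_neg hc, List.modifyHead_modifyHead]
        congr 1
        cases h : pvSplit rest with
        | nil => simp
        | cons a t => simp [Function.comp]

theorem splitOn_eq (xs : List Char) : PySem.Chars.splitOn xs ['#'] = pvSplit xs := by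
  have h := splitOn_go_eq xs (xs.length + 1) [] [] (Nat.le_succ _)
  simp only [List.reverse_nil, List.nil_append] at h
  rw [show (List.modifyHead (fun x => x) (pvSplit xs)) = List.modifyHead id (pvSplit xs) from rfl,
    congrFun List.modifyHead_id (pvSplit xs)] at h
  simpa [PySem.Chars.splitOn] using h

-- counting helpers (proof-side names for B's counts updates)
def pvBump (counts : List Nat) (c : Char) : List Nat := counts.modify c.toNat (· + 1)
def pvAddAll (counts : List Nat) (g : List Char) : List Nat := g.foldl pvBump counts
def pvTally (g : List Char) : List Nat := pvAddAll pvZeros g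

theorem length_addAll (g : List Char) (counts : List Nat) :
    (pvAddAll counts g).length = counts.length := by
  induction g generalizing counts with
  | nil => rfl
  | cons c rest ih =>
    show (pvAddAll (pvBump counts c) rest).length = _
    rw [ih]; simp [pvBump]

theorem getD_bump (counts : List Nat) (c : Char) (k : Nat)
    (hk : k < counts.length) :
    (pvBump counts c).getD k 0 = counts.getD k 0 + (if c.toNat = k then 1 else 0) := by
  simp only [pvBump, List.getD_eq_getElem?_getD, List.getElem?_modify]
  rw [List.getElem?_eq_getElem hk]
  by_cases h : c.toNat = k <;> simp [h]

theorem getD_addAll (g : List Char) (counts : List Nat) (k : Nat)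
    (hk : k < 128) (hcl : counts.length = 128) (hg : ∀ c ∈ g, c.toNat < 128) :
    (pvAddAll counts g).getD k 0 = counts.getD k 0 + g.count (Char.ofNat k) := by
  induction g generalizing counts with
  | nil => simp [pvAddAll]
  | cons c rest ih =>
    have hc : c.toNat < 128 := hg c (by simp)
    have h1 : pvAddAll counts (c :: rest) = pvAddAll (pvBump counts c) rest := rfl
    rw [h1, ih (pvBump counts c) (by simp [pvBump, hcl]) (fun x hx => hg x (by simp [hx])),
      getD_bump counts c k (by omega)]
    rw [List.count_cons]
    have : (c == Char.ofNat k) = decide (c.toNat = k) := by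
      by_cases h : c.toNat = k
      · simp [h, beq_iff_eq]
        rw [← h, Char.ofNat_toNat]
      · simp [h, beq_iff_eq]
        intro he; rw [he] at h; exact h (toNat_ofNat_small k hk)
    rw [this]
    by_cases h : c.toNat = k <;> simp [h] <;> omega

theorem tally_reverse (g : List Char) (hg : ∀ c ∈ g, c.toNat < 128) :
    pvTally g.reverse = pvTally g := by
  have hgr : ∀ c ∈ g.reverse, c.toNat < 128 := fun c hc => hg c (by simpa using hc)
  have hlen0 : (pvZeros : List Nat).length = 128 := by simp [pvZeros]
  apply List.ext_getElem
  · show (pvAddAll pvZeros g.reverse).length = (pvAddAll pvZeros g).length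
    rw [length_addAll, length_addAll]
  · intro i h1 h2
    have hi : i < 128 := by
      have : (pvTally g.reverse).length = 128 := by
        show (pvAddAll pvZeros g.reverse).length = 128
        rw [length_addAll, hlen0]
      omega
    have e1 : (pvTally g.reverse).getD i 0 = (pvTally g.reverse)[i] :=
      List.getD_eq_getElem _ _ h1
    have e2 : (pvTally g).getD i 0 = (pvTally g)[i] := List.getD_eq_getElem _ _ h2
    rw [← e1, ← e2]
    unfold pvTally
    rw [getD_addAll _ _ _ hi hlen0 hgr, getD_addAll _ _ _ hi hlen0 hg, List.count_reverse]

theorem count_flush_aux (counts : List Nat) (a : Char) (n : Nat) (hn : n ≤ 128) :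
    ((List.range n).map
        (fun code => List.count a (List.replicate (counts.getD code 0) (Char.ofNat code)))).sum
      = if a.toNat < n then counts.getD a.toNat 0 else 0 := by
  induction n with
  | zero => simp
  | succ m ih =>
    rw [List.range_succ, List.map_append, List.sum_append, ih (by omega)]
    have hm : m < 128 := by omega
    simp only [List.map_cons, List.map_nil, List.sum_cons, List.sum_nil]
    rw [List.count_replicate]
    by_cases h : a.toNat = m
    · have : (Char.ofNat m == a) = true := by
        simp [beq_iff_eq]; rw [ofNat_eq_iff a m hm]; omega
      rw [this]
      simp [h]
    · have : (Char.ofNat m == a) = false := by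
        simp [beq_iff_eq]; rw [ofNat_eq_iff a m hm]; omega
      rw [this]
      by_cases h2 : a.toNat < m <;> simp [h, h2] <;> omega

theorem count_flush (counts : List Nat) (a : Char) :
    List.count a (pvFlush counts)
      = if a.toNat < 128 then counts.getD a.toNat 0 else 0 := by
  rw [pvFlush, List.count_flatMap]
  have := count_flush_aux counts a 128 (le_refl _)
  simpa [Function.comp] using this

theorem flush_perm (g : List Char) (hg : ∀ c ∈ g, c.toNat < 128) :
    (pvFlush (pvTally g)).Perm g := by
  rw [List.perm_iff_count]
  intro a
  rw [count_flush]
  by_cases h : a.toNat < 128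
  · rw [if_pos h]
    unfold pvTally
    rw [getD_addAll g pvZeros a.toNat h (by simp [pvZeros]) hg, Char.ofNat_toNat]
    have : (pvZeros : List Nat).getD a.toNat 0 = 0 := by
      rw [pvZeros, List.getD_eq_getElem?_getD, List.getElem?_replicate]
      simp [h]
    omega
  · rw [if_neg h, Eq.comm, List.count_eq_zero]
    intro hmem
    exact h (hg a hmem)

theorem flush_pairwise (counts : List Nat) :
    (pvFlush counts).Pairwise (· ≤ ·) := by
  rw [pvFlush, List.pairwise_flatMap]
  constructor
  · intro a _
    rw [List.pairwise_replicate]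
    right; exact le_refl _
  · apply List.Pairwise.imp_of_mem ?_ List.pairwise_lt_range
    intro a b ha hb hab
    intro x hx y hy
    have hxa : x = Char.ofNat a := (List.eq_of_mem_replicate hx)
    have hyb : y = Char.ofNat b := (List.eq_of_mem_replicate hy)
    have ha128 : a < 128 := by simpa using List.mem_range.mp ha
    have hb128 : b < 128 := by simpa using List.mem_range.mp hb
    rw [hxa, hyb, Char.le_def, UInt32.le_iff_toNat_le]
    show (Char.ofNat a).toNat ≤ (Char.ofNat b).toNat
    rw [toNat_ofNat_small a ha128, toNat_ofNat_small b hb128]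
    omega

theorem flush_tally_eq (g : List Char) (hg : ∀ c ∈ g, c.toNat < 128) :
    pvFlush (pvTally g) = (PySem.List.sorted g (fun c => c) true).reverse := by
  apply List.eq_of_perm_of_sorted (le := (· ≤ ·))
  · intro a b _ _ h1 h2; exact le_antisymm h1 h2
  · exact flush_pairwise _
  · rw [List.pairwise_reverse]
    exact PySem.List.sorted_pairwise_rev g (fun c => c)
  · exact (flush_perm g hg).trans ((PySem.List.sorted_perm g (fun c => c) true).symm.trans
      (List.reverse_perm _).symm)

-- B's scan, accumulator removed
def pvScanPure : List Char → List Nat → List Char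
  | [], counts => pvFlush counts
  | c :: rest, counts =>
      if c = '#' then pvFlush counts ++ '#' :: pvScanPure rest pvZeros
      else pvScanPure rest (pvBump counts c)

theorem scan_eq_pure (xs : List Char) : ∀ (counts : List Nat) (out : List Char),
    pvScan xs counts out = out ++ pvScanPure xs counts := by
  induction xs with
  | nil => intro counts out; rfl
  | cons c rest ih =>
    intro counts out
    by_cases h : c = '#'
    · simp only [pvScan, pvScanPure, if_pos h]
      rw [ih]
      simp
    · simp only [pvScan, pvScanPure, if_neg h]
      exact ih _ _

-- what the scan produces, phrased over the split of its input
def pvSpecOf : List (List Char) → List Nat → List Char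
  | [], _ => []
  | g :: rest, counts =>
      pvFlush (pvAddAll counts g) ++ rest.flatMap (fun q => '#' :: pvFlush (pvTally q))

theorem scanPure_spec (xs : List Char) : ∀ (counts : List Nat),
    pvScanPure xs counts = pvSpecOf (pvSplit xs) counts := by
  induction xs with
  | nil => intro counts; simp [pvScanPure, pvSplit, pvSpecOf, pvAddAll]
  | cons c rest ih =>
    intro counts
    by_cases h : c = '#'
    · simp only [pvScanPure, pvSplit, if_pos h]
      rw [ih pvZeros]
      cases hs : pvSplit rest with
      | nil => exact absurd hs (pvSplit_ne_nil rest)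
      | cons g r =>
        simp only [pvSpecOf, List.flatMap_cons]
        show pvFlush counts ++ '#' :: (pvFlush (pvAddAll pvZeros g) ++ _) = _
        simp [pvAddAll, pvTally]
    · simp only [pvScanPure, pvSplit, if_neg h]
      rw [ih (pvBump counts c)]
      cases hs : pvSplit rest with
      | nil => exact absurd hs (pvSplit_ne_nil rest)
      | cons g r =>
        simp only [List.modifyHead, pvSpecOf]
        rfl

theorem specOf_append_last (gs : List (List Char)) (h : List Char) (counts : List Nat)
    (hne : gs ≠ []) :
    pvSpecOf (gs ++ [h]) counts = pvSpecOf gs counts ++ '#' :: pvFlush (pvTally h) := by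
  cases gs with
  | nil => exact absurd rfl hne
  | cons g rest =>
    simp only [List.cons_append, pvSpecOf, List.flatMap_append]
    simp

-- split commutes with reversal
def pvConcatLast : List (List Char) → Char → List (List Char)
  | [], c => [[c]]
  | [g], c => [g ++ [c]]
  | g :: g' :: rest, c => g :: pvConcatLast (g' :: rest) c

theorem split_snoc_hash (zs : List Char) : pvSplit (zs ++ ['#']) = pvSplit zs ++ [[]] := by
  induction zs with
  | nil => simp [pvSplit]
  | cons z zs ih =>
    by_cases h : z = '#'
    · simp only [List.cons_append, pvSplit, if_pos h, ih]
    · simp only [List.cons_append, pvSplit, if_neg h, ih]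
      cases hs : pvSplit zs with
      | nil => exact absurd hs (pvSplit_ne_nil zs)
      | cons g r => simp

theorem concatLast_modifyHead (S : List (List Char)) (z c : Char) (hS : S ≠ []) :
    pvConcatLast (S.modifyHead (z :: ·)) c = (pvConcatLast S c).modifyHead (z :: ·) := by
  cases S with
  | nil => exact absurd rfl hS
  | cons g rest =>
    cases rest with
    | nil => simp [pvConcatLast, List.modifyHead]
    | cons g' r => simp [pvConcatLast, List.modifyHead]

theorem split_snoc_char (zs : List Char) (c : Char) (hc : c ≠ '#') :
    pvSplit (zs ++ [c]) = pvConcatLast (pvSplit zs) c := by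
  induction zs with
  | nil => simp [pvSplit, pvConcatLast, if_neg hc]
  | cons z zs ih =>
    by_cases h : z = '#'
    · simp only [List.cons_append, pvSplit, if_pos h, ih]
      cases hs : pvSplit zs with
      | nil => exact absurd hs (pvSplit_ne_nil zs)
      | cons g r => simp [pvConcatLast]
    · simp only [List.cons_append, pvSplit, if_neg h, ih]
      exact (concatLast_modifyHead (pvSplit zs) z c (pvSplit_ne_nil zs)).symm

theorem concatLast_append_last (L : List (List Char)) (h : List Char) (c : Char) :
    pvConcatLast (L ++ [h]) c = L ++ [h ++ [c]] := by
  induction L with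
  | nil => simp [pvConcatLast]
  | cons g rest ih =>
    cases rest with
    | nil => simp [pvConcatLast, ih]
    | cons g' r =>
      show g :: pvConcatLast ((g' :: r) ++ [h]) c = _
      rw [ih]; rfl

theorem split_reverse (xs : List Char) :
    pvSplit xs.reverse = ((pvSplit xs).map List.reverse).reverse := by
  induction xs with
  | nil => simp [pvSplit]
  | cons c rest ih =>
    rw [List.reverse_cons]
    by_cases h : c = '#'
    · subst h
      rw [split_snoc_hash, ih]
      simp [pvSplit]
    · rw [split_snoc_char _ _ h, ih]
      simp only [pvSplit, if_neg h]
      cases hs : pvSplit rest with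
      | nil => exact absurd hs (pvSplit_ne_nil rest)
      | cons g r =>
        simp only [List.modifyHead, List.map_cons, List.reverse_cons]
        rw [concatLast_append_last]

theorem mem_split (xs : List Char) : ∀ (g : List Char), g ∈ pvSplit xs → ∀ c ∈ g, c ∈ xs := by
  induction xs with
  | nil =>
    intro g hg c hc
    simp [pvSplit] at hg
    subst hg; simp at hc
  | cons x rest ih =>
    intro g hg c hc
    by_cases h : x = '#'
    · simp only [pvSplit, if_pos h, List.mem_cons] at hg
      rcases hg with hg | hg
      · subst hg; simp at hc
      · exact List.mem_cons_of_mem _ (ih g hg c hc)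
    · simp only [pvSplit, if_neg h] at hg
      cases hs : pvSplit rest with
      | nil => exact absurd hs (pvSplit_ne_nil rest)
      | cons a t =>
        rw [hs] at hg
        simp only [List.modifyHead, List.mem_cons] at hg
        rcases hg with hg | hg
        · subst hg
          rcases List.mem_cons.mp hc with hc | hc
          · simp [hc]
          · exact List.mem_cons_of_mem _ (ih a (by simp [hs]) c hc)
        · exact List.mem_cons_of_mem _ (ih g (by simp [hs, hg]) c hc)

-- the reversed tilted row, as pvSpecOf of the reversed groups
theorem rev_join (gs : List (List Char)) : gs ≠ [] →
    (∀ g ∈ gs, ∀ c ∈ g, c.toNat < 128) →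
    (PySem.Chars.join ['#'] (gs.map (fun g => PySem.List.sorted g (fun c => c) true))).reverse
      = pvSpecOf ((gs.map List.reverse).reverse) pvZeros := by
  induction gs with
  | nil => intro h; exact absurd rfl h
  | cons g rest ih =>
    intro _ hg
    cases rest with
    | nil =>
      simp only [List.map_cons, List.map_nil, PySem.Chars.join_singleton, List.reverse_cons,
        List.reverse_nil, List.nil_append]
      show _ = pvSpecOf [g.reverse] pvZeros
      simp only [pvSpecOf, List.flatMap_nil, List.append_nil]
      have hgr : ∀ c ∈ g.reverse, c.toNat < 128 := fun c hc => hg g (by simp) c (by simpa using hc)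
      show _ = pvFlush (pvAddAll pvZeros g.reverse)
      rw [show pvAddAll pvZeros g.reverse = pvTally g.reverse from rfl,
        tally_reverse g (hg g (by simp)), flush_tally_eq g (hg g (by simp))]
    | cons g' r =>
      rw [List.map_cons, List.map_cons, PySem.Chars.join_cons_cons]
      have ih2 := ih (by simp) (fun x hx c hc => hg x (by simp [hx]) c hc)
      rw [List.map_cons] at ih2
      simp only [List.reverse_append, List.reverse_cons]
      have hgsmall : ∀ c ∈ g, c.toNat < 128 := hg g (by simp)
      have hrev : pvFlush (pvTally g.reverse) = (PySem.List.sorted g (fun c => c) true).reverse := by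
        rw [show pvTally g.reverse = pvTally g from tally_reverse g hgsmall, flush_tally_eq g hgsmall]
      rw [List.map_cons, List.reverse_cons, specOf_append_last _ _ _ (by simp), hrev, ← ih2]
      simp

-- transpose = explicit columns
theorem foldl_min_le_init (xs : List (List Char)) (a : Nat) :
    xs.foldl (fun m row => min m row.length) a ≤ a := by
  induction xs generalizing a with
  | nil => exact le_refl a
  | cons x rest ih =>
    exact le_trans (ih (min a x.length)) (min_le_left _ _)

theorem foldl_min_le_mem (xs : List (List Char)) (a : Nat) (r : List Char) (hr : r ∈ xs) :
    xs.foldl (fun m row => min m row.length) a ≤ r.length := by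
  induction xs generalizing a with
  | nil => simp at hr
  | cons x rest ih =>
    rcases List.mem_cons.mp hr with h | h
    · subst h
      exact le_trans (foldl_min_le_init rest _) (min_le_right _ _)
    · exact ih (min a x.length) h

theorem foldl_min_pos (xs : List (List Char)) (a : Nat) (ha : 0 < a)
    (hx : ∀ x ∈ xs, 0 < x.length) : 0 < xs.foldl (fun m row => min m row.length) a := by
  induction xs generalizing a with
  | nil => exact ha
  | cons x rest ih =>
    exact ih (min a x.length) (by
      have := hx x (by simp)
      omega) (fun y hy => hx y (by simp [hy]))

theorem foldl_min_map_tail (xs : List (List Char)) (a : Nat) :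
    (xs.map (·.tail)).foldl (fun m row => min m row.length) (a - 1)
      = xs.foldl (fun m row => min m row.length) a - 1 := by
  induction xs generalizing a with
  | nil => rfl
  | cons x rest ih =>
    show (rest.map (·.tail)).foldl _ (min (a - 1) x.tail.length) = _
    rw [List.length_tail, show min (a - 1) (x.length - 1) = min a x.length - 1 by omega]
    exact ih (min a x.length)

theorem zipGo_eq (fuel : Nat) (rows : List (List Char)) (hne : rows ≠ [])
    (hf : pvMinWidth rows ≤ fuel) :
    pvZipGo fuel rows
      = (List.range (pvMinWidth rows)).map (fun j => rows.map (fun r => r.getD j ' ')) := by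
  induction fuel generalizing rows with
  | zero =>
    have : pvMinWidth rows = 0 := by omega
    simp [pvZipGo, this]
  | succ f ih =>
    cases rows with
    | nil => exact absurd rfl hne
    | cons r rest =>
      by_cases hany : (r :: rest).any (·.isEmpty)
      · have h0 : pvMinWidth (r :: rest) = 0 := by
          obtain ⟨x, hx, hxe⟩ := List.any_eq_true.mp hany
          have hxlen : x.length = 0 := by simpa [List.isEmpty_iff_length_eq_zero] using hxe
          have hmw : pvMinWidth (r :: rest)
              = rest.foldl (fun m row => min m row.length) r.length := rfl
          rcases List.mem_cons.mp hx with h | h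
          · have := foldl_min_le_init rest r.length
            subst h
            omega
          · have := foldl_min_le_mem rest r.length x h
            omega
        simp [pvZipGo, hany, h0]
      · have hall : ∀ x ∈ r :: rest, 0 < x.length := by
          intro x hx
          by_contra hlen
          have : x.isEmpty := by rw [List.isEmpty_iff_length_eq_zero]; omega
          exact (by simpa [hany] using List.any_eq_true.mpr ⟨x, hx, this⟩)
        have hwpos : 0 < pvMinWidth (r :: rest) :=
          foldl_min_pos rest r.length (hall r (by simp)) (fun y hy => hall y (by simp [hy]))
        have htail : pvMinWidth ((r :: rest).map (·.tail)) = pvMinWidth (r :: rest) - 1 := by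
          show (rest.map (·.tail)).foldl _ r.tail.length = _
          rw [List.length_tail]
          exact foldl_min_map_tail rest r.length
        rw [pvZipGo, if_neg (by simp [hany])]
        rw [ih ((r :: rest).map (·.tail)) (by simp) (by rw [htail]; omega)]
        obtain ⟨w, hw⟩ : ∃ w, pvMinWidth (r :: rest) = w + 1 :=
          ⟨pvMinWidth (r :: rest) - 1, by omega⟩
        rw [htail, hw]
        simp only [Nat.add_sub_cancel, List.range_succ_eq_map, List.map_cons, List.map_map]
        congr 1
        · congr 1
          · cases r <;> rfl
          · apply List.map_congr_left; intro x _; cases x <;> rfl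
        · apply List.map_congr_left
          intro j _
          simp only [Function.comp]
          congr 1
          · cases r <;> rfl
          · apply List.map_congr_left; intro x _; cases x <;> rfl

theorem zipStar_eq (rows : List (List Char)) :
    pvZipStar rows
      = (List.range (pvMinWidth rows)).map (fun j => rows.map (fun r => r.getD j ' ')) := by
  cases rows with
  | nil => simp [pvZipStar, pvMinWidth]
  | cons r rest =>
    exact zipGo_eq r.length (r :: rest) (by simp) (foldl_min_le_init rest r.length)

-- one loop iteration: A's body equals B's body on sub-128 grids
def pvSmall (g : List (List Char)) : Prop := ∀ r ∈ g, ∀ c ∈ r, c.toNat < 128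

theorem step_eq (g : List (List Char)) (hs : pvSmall g) : pvStepA g = pvStepB g := by
  unfold pvStepA pvStepB
  rw [zipStar_eq, List.map_map, List.map_map]
  apply List.map_congr_left
  intro j _
  simp only [Function.comp]
  have hcol : ∀ c ∈ g.map (fun r => r.getD j ' '), c.toNat < 128 := by
    intro c hc
    rcases List.mem_map.mp hc with ⟨r, hr, rfl⟩
    by_cases hj : j < r.length
    · rw [List.getD_eq_getElem r ' ' hj]
      exact hs r hr _ (List.getElem_mem hj)
    · rw [List.getD_eq_default r ' ' (by omega)]
      decide
  rw [PySem.List.slice?_none_none_neg_one, Option.getD_some,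
    scan_eq_pure, List.nil_append, scanPure_spec, split_reverse]
  unfold pvTilt
  rw [splitOn_eq]
  exact rev_join (pvSplit (g.map (fun r => r.getD j ' ')))
    (pvSplit_ne_nil _)
    (fun gg hgg c hc => hcol c (mem_split _ gg hgg c hc))

theorem mem_flush (counts : List Nat) (c : Char) (hc : c ∈ pvFlush counts) :
    ∃ k, k < 128 ∧ c = Char.ofNat k := by
  rw [pvFlush, List.mem_flatMap] at hc
  obtain ⟨k, hk, hc⟩ := hc
  exact ⟨k, List.mem_range.mp hk, List.eq_of_mem_replicate hc⟩

theorem mem_scan (xs : List Char) : ∀ (counts : List Nat) (out : List Char), ∀ c ∈ pvScan xs counts out,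
    c ∈ out ∨ c = '#' ∨ ∃ k, k < 128 ∧ c = Char.ofNat k := by
  induction xs with
  | nil =>
    intro counts out c hc
    rcases List.mem_append.mp hc with h | h
    · exact Or.inl h
    · exact Or.inr (Or.inr (mem_flush counts c h))
  | cons x rest ih =>
    intro counts out c hc
    by_cases hx : x = '#'
    · rw [pvScan, if_pos hx] at hc
      rcases ih _ _ c hc with h | h
      · rcases List.mem_append.mp h with h2 | h2
        · rcases List.mem_append.mp h2 with h3 | h3
          · exact Or.inl h3
          · exact Or.inr (Or.inr (mem_flush counts c h3))
        · exact Or.inr (Or.inl (by simpa using h2))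
      · exact Or.inr h
    · rw [pvScan, if_neg hx] at hc
      exact ih _ _ c hc

theorem stepB_small (g : List (List Char)) : pvSmall (pvStepB g) := by
  intro r hr c hc
  rcases List.mem_map.mp hr with ⟨j, _, rfl⟩
  rcases mem_scan _ _ _ c hc with h | h | ⟨k, hk, rfl⟩
  · simp at h
  · subst h; decide
  · rw [toNat_ofNat_small k hk]; exact hk

-- ===== VERDICT (by name: the statement is the Claim_ definition above) =====
theorem spin_cycle_spec : Claim_equal_spin_cycle := by
  intro data hdom
  unfold Spec_spin_cycle spin_cycle spin_cycle_alt
  rw [show PySem.List.pyRange 0 4 1 = [0, 1, 2, 3] from by decide]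
  simp only [List.foldl_cons, List.foldl_nil]
  have h0 : pvSmall (data.map String.toList) := by
    intro r hr c hc
    rcases List.mem_map.mp hr with ⟨s, hs, rfl⟩
    have hall := List.all_eq_true.mp hdom s hs
    have hch := List.all_eq_true.mp (by simpa [pvDomStr] using hall) c hc
    simp only [pvDomChar, Bool.or_eq_true, Bool.and_eq_true, decide_eq_true_eq, beq_iff_eq]
      at hch
    rcases hch with ((⟨h1, h2⟩ | h) | h) | h <;> omega
  rw [step_eq _ h0, step_eq _ (stepB_small _), step_eq _ (stepB_small _),
    step_eq _ (stepB_small _)]
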